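-- pv_equiv track=rewrite | github.com/helge9210/geeksforgeeks | basic/twicecounter.py | count_double_words
-- ===== SOURCE A (Python) =====
-- def count_double_words(array):
--     words = {}
--     counter = 0
--     for word in array:
--         if word not in words:
--             words[word] = 1
--         else:
--             words[word] += 1
--
--     for word, c in words.items():
--         if c == 2:
--             counter += 1
--
--     return counter
-- ===== SOURCE B (Python) =====
-- def count_double_words(array):
--     counter = 0
--     counts = {}
--     for word in array:
--         c = counts.get(word, 0) + 1
--         counts[word] = c
--         if c == 2:
--             counter += 1
--         elif c == 3:
--             counter -= 1
--     return counter
-- ===== Notes on version B (the rewrite author's own statement) =====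
-- stated objective: alternative
-- what changed: Single pass that maintains the exactly-twice counter live (increment on a word's 2nd occurrence, decrement on its 3rd) instead of building the count dict and then scanning its items in a second loop.
import Mathlib
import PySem

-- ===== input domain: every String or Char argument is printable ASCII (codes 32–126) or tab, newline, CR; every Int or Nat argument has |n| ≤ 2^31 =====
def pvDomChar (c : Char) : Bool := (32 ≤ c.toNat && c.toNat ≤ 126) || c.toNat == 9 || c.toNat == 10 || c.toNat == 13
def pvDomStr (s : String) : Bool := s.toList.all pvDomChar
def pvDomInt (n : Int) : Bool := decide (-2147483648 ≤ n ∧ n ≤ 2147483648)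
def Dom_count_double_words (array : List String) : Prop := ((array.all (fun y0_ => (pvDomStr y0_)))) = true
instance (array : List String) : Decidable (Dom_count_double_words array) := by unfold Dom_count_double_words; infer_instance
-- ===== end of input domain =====

-- B maintains the exactly-twice counter live in one pass instead of a second scan over the dict's items.


-- ===== PORT A =====
def count_double_words (array : List String) : Int :=
  let words : PySem.Dict String Int :=
    array.foldl (fun d word =>
      if d.contains word = false then d.insert word 1
      else d.insert word (d.getD word 0 + 1)) PySem.Dict.empty
  words.items.foldl (fun counter p => if p.2 = 2 then counter + 1 else counter) 0

-- ===== PORT B =====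
def count_double_words_alt (array : List String) : Int :=
  (array.foldl (fun st word =>
      let c := st.1.getD word 0 + 1
      (st.1.insert word c,
       if c = 2 then st.2 + 1 else if c = 3 then st.2 - 1 else st.2))
    ((PySem.Dict.empty : PySem.Dict String Int), (0 : Int))).2

-- ===== PRECONDITION & SPEC =====
def Spec_count_double_words (array : List String) (out : Int) : Prop := out = count_double_words_alt array
instance (array : List String) (out : Int) : Decidable (Spec_count_double_words array out) := by unfold Spec_count_double_words; infer_instance

-- ===== CLAIM (what is proved, stated in full; the proofs are below) =====
def Claim_equal_count_double_words : Prop := ∀ (array : List String), Dom_count_double_words array → Spec_count_double_words array (count_double_words array)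

-- ===== LEMMAS AND PROOFS =====

-- number of keys currently mapped to 2
def cnt2 (d : PySem.Dict String Int) : Int :=
  ((d.keys.countP (fun k => decide (d.getD k 0 = 2)) : Nat) : Int)

def insStep (d : PySem.Dict String Int) (w : String) : PySem.Dict String Int :=
  d.insert w (d.getD w 0 + 1)

-- countP changes only at w, a nodup member
theorem countP_swap (l : List String) (f g : String → Bool) (w : String)
    (hnd : l.Nodup) (hw : w ∈ l) (h : ∀ k ∈ l, k ≠ w → f k = g k) :
    l.countP g + (if f w then 1 else 0) = l.countP f + (if g w then 1 else 0) := by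
  induction l with
  | nil => cases hw
  | cons a t ih =>
    simp only [List.countP_cons] at *
    rcases List.mem_cons.mp hw with rfl | hwt
    · have ht : t.countP f = t.countP g := by
        apply List.countP_congr
        intro k hk
        have hkw : k ≠ w := by rintro rfl; exact (List.nodup_cons.mp hnd).1 hk
        rw [h k (List.mem_cons_of_mem _ hk) hkw]
      rw [ht]; omega
    · have hne : a ≠ w := by rintro rfl; exact (List.nodup_cons.mp hnd).1 hwt
      have hih := ih (List.nodup_cons.mp hnd).2 hwt (fun k hk => h k (List.mem_cons_of_mem _ hk))
      rw [h a (List.mem_cons_self) hne]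
      omega

theorem cnt2_step (d : PySem.Dict String Int) (w : String) (hnd : d.keys.Nodup) :
    cnt2 (insStep d w)
      = cnt2 d + (if d.getD w 0 + 1 = 2 then 1 else 0)
              - (if d.getD w 0 + 1 = 3 then 1 else 0) := by
  by_cases hc : d.contains w = true
  · have hk : (insStep d w).keys = d.keys :=
      PySem.Dict.keys_insert_of_contains d (d.getD w 0 + 1) hc
    have hwmem : w ∈ d.keys := (PySem.Dict.contains_iff_mem_keys d w).mp hc
    have hswap := countP_swap d.keys
      (fun k => decide (d.getD k 0 = 2))
      (fun k => decide ((insStep d w).getD k 0 = 2)) w hnd hwmem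
      (by
        intro k _ hkw
        simp [insStep, PySem.Dict.getD_insert, hkw])
    have h1 : (insStep d w).getD w 0 = d.getD w 0 + 1 := by
      simp [insStep, PySem.Dict.getD_insert_self]
    simp only [h1, decide_eq_true_eq] at hswap
    simp only [cnt2, hk]
    split_ifs at hswap ⊢ <;> omega
  · have hc' : d.contains w = false := by simpa using hc
    have h0 : d.getD w 0 = 0 := PySem.Dict.getD_of_not_contains d 0 hc'
    have hk : (insStep d w).keys = d.keys ++ [w] :=
      PySem.Dict.keys_insert_of_not_contains d (d.getD w 0 + 1) hc'
    have hwnot : w ∉ d.keys := fun hm =>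
      by simp [(PySem.Dict.contains_iff_mem_keys d w).mpr hm] at hc'
    have hsame : d.keys.countP (fun k => decide ((insStep d w).getD k 0 = 2))
        = d.keys.countP (fun k => decide (d.getD k 0 = 2)) := by
      apply List.countP_congr
      intro k hk'
      have hkw : k ≠ w := fun h => hwnot (h ▸ hk')
      simp [insStep, PySem.Dict.getD_insert, hkw]
    simp only [cnt2, hk, List.countP_append, hsame, List.countP_cons, List.countP_nil,
      decide_eq_true_eq]
    have h1 : (insStep d w).getD w 0 = d.getD w 0 + 1 := by
      simp [insStep, PySem.Dict.getD_insert_self]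
    rw [h1, h0]
    norm_num

theorem b_fold_snd (l : List String) (d : PySem.Dict String Int) (n : Int)
    (hnd : d.keys.Nodup) :
    (l.foldl (fun st word =>
      let c := st.1.getD word 0 + 1
      (st.1.insert word c,
       if c = 2 then st.2 + 1 else if c = 3 then st.2 - 1 else st.2)) (d, n)).2
    = n - cnt2 d + cnt2 (l.foldl insStep d) := by
  induction l generalizing d n with
  | nil => simp
  | cons a t ih =>
    have hnd' : (insStep d a).keys.Nodup :=
      PySem.Dict.nodup_keys_insert d a (d.getD a 0 + 1) hnd
    have hih := ih (insStep d a)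
      (if d.getD a 0 + 1 = 2 then n + 1 else if d.getD a 0 + 1 = 3 then n - 1 else n) hnd'
    rw [List.foldl_cons]
    have hstate : (let c := (d, n).1.getD a 0 + 1
        ((d, n).1.insert a c,
         if c = 2 then (d, n).2 + 1 else if c = 3 then (d, n).2 - 1 else (d, n).2))
        = (insStep d a,
           if d.getD a 0 + 1 = 2 then n + 1 else if d.getD a 0 + 1 = 3 then n - 1 else n) := by
      simp [insStep]
    rw [hstate, hih, List.foldl_cons, cnt2_step d a hnd]
    split_ifs <;> omega

theorem a_items_loop (L : List (String × Int)) (acc : Int) :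
    L.foldl (fun counter p => if p.2 = 2 then counter + 1 else counter) acc
      = acc + ((L.countP (fun p => decide (p.2 = 2)) : Nat) : Int) := by
  induction L generalizing acc with
  | nil => simp
  | cons p t ih =>
    simp only [List.foldl_cons, List.countP_cons, decide_eq_true_eq, ih]
    split_ifs <;> push_cast <;> omega

theorem a_loop_eq_insStep (l : List String) (d : PySem.Dict String Int) :
    l.foldl (fun d word =>
      if d.contains word = false then d.insert word 1
      else d.insert word (d.getD word 0 + 1)) d
    = l.foldl insStep d := by
  induction l generalizing d with
  | nil => rfl
  | cons a t ih =>
    simp only [List.foldl_cons]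
    rw [show (if d.contains a = false then d.insert a 1
        else d.insert a (d.getD a 0 + 1)) = insStep d a from by
      by_cases hc : d.contains a = true
      · simp [insStep, hc]
      · have hc' : d.contains a = false := by simpa using hc
        simp [insStep, hc', PySem.Dict.getD_of_not_contains d 0 hc']]
    exact ih (insStep d a)

theorem cnt2_eq_items (d : PySem.Dict String Int) (hnd : d.keys.Nodup) :
    ((d.items.countP (fun p => decide (p.2 = 2)) : Nat) : Int) = cnt2 d := by
  rw [PySem.Dict.items_eq_map_keys d hnd 0, List.countP_map, cnt2]
  rfl

-- ===== VERDICT (by name: the statement is the Claim_ definition above) =====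
theorem count_double_words_spec : Claim_equal_count_double_words := by
  intro array _
  unfold Spec_count_double_words count_double_words count_double_words_alt
  have hnd : (array.foldl insStep PySem.Dict.empty).keys.Nodup := by
    simpa [insStep] using PySem.Dict.nodup_keys_foldl_insert array
      (fun d w => d.getD w 0 + 1) PySem.Dict.empty PySem.Dict.nodup_keys_empty
  rw [a_loop_eq_insStep, a_items_loop, cnt2_eq_items _ hnd,
      b_fold_snd array PySem.Dict.empty 0 PySem.Dict.nodup_keys_empty]
  simp [cnt2, PySem.Dict.keys_empty]
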